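-- pv_equiv track=rewrite | github.com/Nitesh-Bhardwaj-git/MindMend | Mind_Mend/services.py | _recently_asked_location
-- ===== SOURCE A (Python) =====
-- def _recently_asked_location(history):
--     if not history:
--         return False
--     for i in range(len(history) - 1, -1, -1):
--         if history[i].get('role') == 'assistant':
--             text = (history[i].get('content') or '').lower()
--             if any(p in text for p in [
--                 'where are you', 'where are you right now', 'which place', 'where are you at',
--                 'are you in class', 'are you at home', 'are you at work', 'are you in the office',
--                 'आप अभी कहाँ हैं', 'आप अभी कहां हैं', 'आप अभी कहां पर हैं', 'आप किस जगह हैं'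
--             ]):
--                 return True
--             if '?' in text:
--                 return True
--             return False
--     return False
-- ===== SOURCE B (Python) =====
-- _PHRASES = [
--     'where are you', 'where are you right now', 'which place', 'where are you at',
--     'are you in class', 'are you at home', 'are you at work', 'are you in the office',
--     'आप अभी कहाँ हैं', 'आप अभी कहां हैं', 'आप अभी कहां पर हैं', 'आप किस जगह हैं'
-- ]
--
-- def _recently_asked_location(history):
--     # Maintain the running answer itself: every assistant message overwrites it
--     # with its own content verdict; no message is ever located or kept.
--     asked = False
--     for m in history:
--         if m.get('role') == 'assistant':
--             text = (m.get('content') or '').lower()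
--             asked = '?' in text or any(p in text for p in _PHRASES)
--     return asked
-- ===== Notes on version B (the rewrite author's own statement) =====
-- stated objective: alternative
-- what changed: B never locates the last assistant message: it evaluates the content predicate on every assistant message in one forward pass and maintains a running boolean answer that each assistant message overwrites, whereas A scans backward and returns from inside the loop at the first assistant message.
import Mathlib
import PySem

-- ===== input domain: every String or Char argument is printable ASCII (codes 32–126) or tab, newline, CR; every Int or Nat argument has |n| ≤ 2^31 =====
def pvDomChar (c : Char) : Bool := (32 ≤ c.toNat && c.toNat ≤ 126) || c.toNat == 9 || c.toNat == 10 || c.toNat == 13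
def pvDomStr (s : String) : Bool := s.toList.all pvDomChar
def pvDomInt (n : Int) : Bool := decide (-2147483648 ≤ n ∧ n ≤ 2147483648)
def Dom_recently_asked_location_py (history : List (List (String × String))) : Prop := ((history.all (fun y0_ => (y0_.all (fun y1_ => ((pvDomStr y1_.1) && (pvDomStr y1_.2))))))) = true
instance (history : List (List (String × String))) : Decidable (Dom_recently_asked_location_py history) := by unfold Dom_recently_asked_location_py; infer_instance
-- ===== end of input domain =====

-- B maintains a running boolean answer, re-evaluating the content predicate on every
-- assistant message in one forward pass, instead of A's backward scan with early returns;
-- same behaviour, different state maintained (alternative decomposition).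


-- ===== PORT A =====
-- the phrase list of A (identical literal list in B's source)
def pvPhrases : List String :=
  ["where are you", "where are you right now", "which place", "where are you at",
   "are you in class", "are you at home", "are you at work", "are you in the office",
   "आप अभी कहाँ हैं", "आप अभी कहां हैं", "आप अभी कहां पर हैं", "आप किस जगह हैं"]

-- the backward index loop of A, transcribed as recursion over history.reverse
-- (range(len-1,-1,-1) visits exactly the elements of the reversed list)
def pvALoop : List (List (String × String)) → Bool
  | [] => false
  | m :: rest =>
    if (PySem.Dict.mk m).get? "role" == some "assistant" then
      let text := PySem.Str.lower ((PySem.Dict.mk m).getD "content" "")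
      if pvPhrases.any (fun p => PySem.Str.isIn p text) then true
      else if PySem.Str.isIn "?" text then true
      else false
    else pvALoop rest

def recently_asked_location_py (history : List (List (String × String))) : Bool :=
  if history = [] then false else pvALoop history.reverse

-- ===== PORT B =====
-- B's per-message content verdict ('?' first, then the phrases, as in Source B)
def pvVerdict (m : List (String × String)) : Bool :=
  let text := PySem.Str.lower ((PySem.Dict.mk m).getD "content" "")
  PySem.Str.isIn "?" text || pvPhrases.any (fun p => PySem.Str.isIn p text)

-- one forward fold; each assistant message overwrites the running boolean answer
def recently_asked_location_py_alt (history : List (List (String × String))) : Bool :=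
  history.foldl
    (fun asked m =>
      if (PySem.Dict.mk m).get? "role" == some "assistant" then pvVerdict m else asked)
    false

-- ===== PRECONDITION & SPEC =====
def Spec_recently_asked_location_py (history : List (List (String × String))) (out : Bool) : Prop := out = recently_asked_location_py_alt history
instance (history : List (List (String × String))) (out : Bool) : Decidable (Spec_recently_asked_location_py history out) := by unfold Spec_recently_asked_location_py; infer_instance

-- ===== CLAIM (what is proved, stated in full; the proofs are below) =====
def Claim_equal_recently_asked_location_py : Prop := ∀ (history : List (List (String × String))), Dom_recently_asked_location_py history → Spec_recently_asked_location_py history (recently_asked_location_py history)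

-- ===== LEMMAS AND PROOFS =====

-- shorthand used only in the proofs
def pvIsAsst (m : List (String × String)) : Bool :=
  (PySem.Dict.mk m).get? "role" == some "assistant"

-- B's fold = verdict of the first assistant message of the reversed list (acc if none)
theorem pvFoldl_last (l : List (List (String × String))) (acc : Bool) :
    l.foldl (fun asked m =>
        if (PySem.Dict.mk m).get? "role" == some "assistant" then pvVerdict m else asked) acc
      = match l.reverse.find? pvIsAsst with
        | none => acc
        | some m => pvVerdict m := by
  induction l generalizing acc with
  | nil => simp
  | cons x t ih =>
    simp only [List.foldl_cons, List.reverse_cons, List.find?_append, ih]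
    cases h : (PySem.Dict.mk x).get? "role" == some "assistant" <;>
      cases hf : t.reverse.find? pvIsAsst <;>
      simp [List.find?, pvIsAsst, h, hf]

-- A's loop = verdict of the first assistant message of its input (false if none)
theorem pvALoop_find (r : List (List (String × String))) :
    pvALoop r = match r.find? pvIsAsst with
                | none => false
                | some m => pvVerdict m := by
  induction r with
  | nil => simp [pvALoop]
  | cons m rest ih =>
    cases h : pvIsAsst m with
    | true =>
      rw [List.find?_cons_of_pos h]
      have h2 : ((PySem.Dict.mk m).get? "role" == some "assistant") = true := h
      simp only [pvALoop, h2, if_true, pvVerdict]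
      cases hp : pvPhrases.any (fun p => PySem.Str.isIn p (PySem.Str.lower ((PySem.Dict.mk m).getD "content" ""))) <;>
        cases hq : PySem.Str.isIn "?" (PySem.Str.lower ((PySem.Dict.mk m).getD "content" "")) <;>
        simp [hp, hq]
    | false =>
      rw [List.find?_cons_of_neg (by simp [h])]
      have h2 : ((PySem.Dict.mk m).get? "role" == some "assistant") = false := h
      simp only [pvALoop, h2, Bool.false_eq_true, if_false]
      exact ih

-- ===== VERDICT (by name: the statement is the Claim_ definition above) =====
theorem recently_asked_location_py_spec : Claim_equal_recently_asked_location_py := by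
  intro history _
  unfold Spec_recently_asked_location_py recently_asked_location_py recently_asked_location_py_alt
  rw [pvFoldl_last]
  cases history with
  | nil => simp
  | cons x t =>
    rw [if_neg (by simp), pvALoop_find]
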